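-- pv_equiv track=rewrite | github.com/raear/indexer-assignment-dataset | indexer_assignment_dataset/reviewer_assignment/dataset/create_exclude_list.py | create_reviewer_by_name_lookup
-- ===== SOURCE A (Python) =====
-- def contruct_author_name(author_info):
--     surname = author_info["surname"]
--     surname = surname.strip().lower() if surname else ""
--     given_names = author_info["given_names"]
--     given_names = given_names.strip().lower() if given_names else ""
--     first_name = given_names.split()[0].strip() if given_names else ""
--     author_name = f"{surname} {first_name}"
--     return author_name
--
-- def create_reviewer_by_name_lookup(reviewer_publications_list):
--     lookup_reviewers_by_name = {}
--     for reviewer in reviewer_publications_list: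
--         name = contruct_author_name(reviewer)
--         if name not in lookup_reviewers_by_name:
--             lookup_reviewers_by_name[name] = []
--         lookup_reviewers_by_name[name].append(reviewer)
--     return lookup_reviewers_by_name
-- ===== SOURCE B (Python) =====
-- def contruct_author_name(author_info):
--     surname = author_info["surname"]
--     surname = surname.strip().lower() if surname else ""
--     given_names = author_info["given_names"]
--     given_names = given_names.strip().lower() if given_names else ""
--     first_name = given_names.split()[0].strip() if given_names else ""
--     author_name = f"{surname} {first_name}"
--     return author_name
--
-- def create_reviewer_by_name_lookup(reviewer_publications_list):
--     names = [contruct_author_name(r) for r in reviewer_publications_list]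
--     order = list(dict.fromkeys(names))
--     return {n: [r for r, m in zip(reviewer_publications_list, names) if m == n]
--             for n in order}
-- ===== Notes on version B (the rewrite author's own statement) =====
-- stated objective: alternative
-- what changed: Replaces A's single-pass dict-building loop (create key if absent, append) with a two-phase grouping: precompute all names, dedupe them in first-occurrence order with dict.fromkeys, then build each group by a zip-filter comprehension.
import Mathlib
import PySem

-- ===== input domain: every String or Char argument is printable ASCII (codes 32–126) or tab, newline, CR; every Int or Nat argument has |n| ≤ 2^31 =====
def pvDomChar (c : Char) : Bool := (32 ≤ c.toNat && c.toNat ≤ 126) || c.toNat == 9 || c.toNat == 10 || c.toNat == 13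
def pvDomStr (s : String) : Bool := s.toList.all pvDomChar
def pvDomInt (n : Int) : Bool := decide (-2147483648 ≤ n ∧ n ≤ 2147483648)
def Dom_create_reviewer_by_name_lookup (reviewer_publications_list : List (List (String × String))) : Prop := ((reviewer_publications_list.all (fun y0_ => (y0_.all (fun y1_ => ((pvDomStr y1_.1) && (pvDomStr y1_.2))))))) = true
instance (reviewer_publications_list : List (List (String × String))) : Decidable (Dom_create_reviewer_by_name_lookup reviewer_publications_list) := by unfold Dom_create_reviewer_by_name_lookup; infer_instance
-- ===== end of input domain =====

-- B groups by precomputing all names, deduping them in first-occurrence order, then building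
-- each group with a zip-filter pass, instead of A's single-pass dict-building loop. Same result.

-- ===== PORT A =====
-- shared helper (identical in Source A and Source B); dict lookup = first match in the assoc list,
-- `.getD ""` is unreachable under Pre_ (Python raises KeyError there);
-- split()[0] is ported via pyGet?, whose `.getD ""` branch is unreachable since given_names
-- is a nonempty stripped string there.
def contruct_author_name (author_info : List (String × String)) : String :=
  let surname0 := (author_info.lookup "surname").getD ""
  let surname := if surname0 ≠ "" then PySem.Str.lower (PySem.Str.strip surname0) else ""
  let given_names0 := (author_info.lookup "given_names").getD ""
  let given_names := if given_names0 ≠ "" then PySem.Str.lower (PySem.Str.strip given_names0) else ""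
  let first_name := if given_names ≠ "" then PySem.Str.strip ((PySem.List.pyGet? (PySem.Str.split₀ given_names) 0).getD "") else ""
  surname ++ " " ++ first_name

def create_reviewer_by_name_lookup (reviewer_publications_list : List (List (String × String))) : List (String × List (List (String × String))) :=
  (reviewer_publications_list.foldl
    (fun lookup_reviewers_by_name reviewer =>
      let name := contruct_author_name reviewer
      let lookup_reviewers_by_name :=
        if lookup_reviewers_by_name.contains name then lookup_reviewers_by_name
        else lookup_reviewers_by_name.insert name []
      -- lookup[name].append(reviewer): key is present, so get-then-set = modify with any default
      lookup_reviewers_by_name.modify name [] (fun g => g ++ [reviewer]))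
    (PySem.Dict.empty : PySem.Dict String (List (List (String × String))))).items

-- ===== PORT B =====
def create_reviewer_by_name_lookup_alt (reviewer_publications_list : List (List (String × String))) : List (String × List (List (String × String))) :=
  let names := reviewer_publications_list.map contruct_author_name
  let order := PySem.List.dedup names   -- list(dict.fromkeys(names))
  -- dict comprehension over the distinct names: its items are exactly this map
  order.map (fun n =>
    (n, ((reviewer_publications_list.zip names).filter (fun p => p.2 == n)).map (fun p => p.1)))

-- ===== PRECONDITION & SPEC =====
-- Pre_ excludes exactly the inputs where Python A raises KeyError: a reviewer dict missing
-- the "surname" or "given_names" key.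
def Pre_create_reviewer_by_name_lookup (reviewer_publications_list : List (List (String × String))) : Prop :=
  ∀ r ∈ reviewer_publications_list, "surname" ∈ r.map Prod.fst ∧ "given_names" ∈ r.map Prod.fst
instance (reviewer_publications_list : List (List (String × String))) : Decidable (Pre_create_reviewer_by_name_lookup reviewer_publications_list) := by unfold Pre_create_reviewer_by_name_lookup; infer_instance
def pvWitness_create_reviewer_by_name_lookup : (List (List (String × String))) :=
  [[("surname", " Doe "), ("given_names", "Jane Q")], [("surname", "doe"), ("given_names", "jane X")]]
def Spec_create_reviewer_by_name_lookup (reviewer_publications_list : List (List (String × String))) (out : List (String × List (List (String × String)))) : Prop := out = create_reviewer_by_name_lookup_alt reviewer_publications_list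
instance (reviewer_publications_list : List (List (String × String))) (out : List (String × List (List (String × String)))) : Decidable (Spec_create_reviewer_by_name_lookup reviewer_publications_list out) := by unfold Spec_create_reviewer_by_name_lookup; infer_instance

-- ===== CLAIM (what is proved, stated in full; the proofs are below) =====
def Claim_equal_create_reviewer_by_name_lookup : Prop := ∀ (reviewer_publications_list : List (List (String × String))), Dom_create_reviewer_by_name_lookup reviewer_publications_list → Pre_create_reviewer_by_name_lookup reviewer_publications_list → Spec_create_reviewer_by_name_lookup reviewer_publications_list (create_reviewer_by_name_lookup reviewer_publications_list)

-- ===== LEMMAS AND PROOFS =====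

-- inserting an empty group before appending is the same as modifying with default []
theorem insert_then_modify {ν : Type} (d : PySem.Dict String ν) (n : String) (v : ν) (f : ν → ν) :
    (if d.contains n then d else d.insert n v).modify n v f = d.modify n v f := by
  by_cases hc : d.contains n
  · simp [hc]
  · simp only [hc, Bool.false_eq_true, if_false, PySem.Dict.modify,
      PySem.Dict.getD_insert_self, PySem.Dict.insert_insert_self,
      PySem.Dict.getD_of_not_contains d v (Bool.not_eq_true (d.contains n) |>.mp hc)]

-- A's fold, characterised
theorem fold_getD (l : List (List (String × String)))
    (d : PySem.Dict String (List (List (String × String)))) (c : String) :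
    (l.foldl (fun d r => d.modify (contruct_author_name r) [] (fun g => g ++ [r])) d).getD c []
      = d.getD c [] ++ l.filter (fun r => contruct_author_name r == c) := by
  induction l generalizing d with
  | nil => simp
  | cons h t ih =>
    rw [List.foldl_cons, ih, List.filter_cons]
    by_cases hc : contruct_author_name h == c
    · have : c = contruct_author_name h := (beq_iff_eq.mp hc).symm
      subst this
      simp [PySem.Dict.getD_modify_self]
    · have hne : c ≠ contruct_author_name h := fun e => hc (beq_iff_eq.mpr e.symm)
      simp [hc, PySem.Dict.getD_modify_of_ne d [] (fun g => g ++ [h]) hne]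

theorem zip_filter (l : List (List (String × String))) (n : String) :
    ((l.zip (l.map contruct_author_name)).filter (fun p => p.2 == n)).map (fun p => p.1)
      = l.filter (fun r => contruct_author_name r == n) := by
  induction l with
  | nil => simp
  | cons h t ih =>
    by_cases hc : contruct_author_name h == n <;> simp [hc, ih]

-- ===== VERDICT (by name: the statement is the Claim_ definition above) =====
theorem create_reviewer_by_name_lookup_spec : Claim_equal_create_reviewer_by_name_lookup := by
  intro l _ _
  unfold Spec_create_reviewer_by_name_lookup create_reviewer_by_name_lookup create_reviewer_by_name_lookup_alt
  simp only [insert_then_modify]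
  have hk : (l.foldl (fun d r => d.modify (contruct_author_name r) [] (fun g => g ++ [r]))
      (PySem.Dict.empty : PySem.Dict String (List (List (String × String))))).keys
      = PySem.Set.ofList (l.map contruct_author_name) := by
    rw [PySem.Dict.keys_foldl_modify_key]
    simp [PySem.Dict.keys_empty, PySem.Set.update_nil_left]
  have hnd : (l.foldl (fun d r => d.modify (contruct_author_name r) [] (fun g => g ++ [r]))
      (PySem.Dict.empty : PySem.Dict String (List (List (String × String))))).keys.Nodup := by
    rw [hk]; exact PySem.Set.nodup_ofList _
  rw [PySem.Dict.items_eq_map_keys _ hnd ([] : List (List (String × String))), hk]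
  simp only [PySem.List.dedup_eq_ofList]
  apply List.map_congr_left
  intro n _
  rw [fold_getD, zip_filter]
  simp [PySem.Dict.getD_empty]
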